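-- pv_equiv track=rewrite | github.com/emanuelegiona/NLP2019_HW2 | code/utils.py | get_synset_vocab
-- ===== SOURCE A (Python) =====
-- def get_synset_vocab(word_to_ix):
--     """
--     Given a vocabulary, builds a same synset vocabulary.
--     :param word_to_ix: Vocabulary obtained from utils.get_vocab, as Dict
--     :return: Synset vocabulary mapping a BabelNet synset ID to a List of integers consistent with word_to_ix, as Dict
--     """
--
--     syn_to_ix = {}
--
--     for word in word_to_ix.keys():
--         bn_id_pos = word.find("_bn:")
--         if bn_id_pos < 0:
--             continue
--
--         bn_id = word[bn_id_pos + 1:]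
--         if bn_id not in syn_to_ix:
--             syn_to_ix[bn_id] = [word_to_ix[word]]
--         else:
--             syn_to_ix[bn_id].append(word_to_ix[word])
--
--     return syn_to_ix
-- ===== SOURCE B (Python) =====
-- def get_synset_vocab(word_to_ix):
--     pairs = [(w[w.find("_bn:") + 1:], ix)
--              for w, ix in word_to_ix.items() if w.find("_bn:") >= 0]
--     order = dict.fromkeys(k for k, _ in pairs)
--     return {k: [ix for k2, ix in pairs if k2 == k] for k in order}
-- ===== Notes on version B (the rewrite author's own statement) =====
-- stated objective: alternative
-- what changed: Replaces A's incremental dict-mutation loop (append-or-create per word) with a two-pass comprehension pipeline: extract all (bn_id, index) pairs once, dedup the bn_ids in first-occurrence order, then build each group's index list by a per-key comprehension over the pair list.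
import Mathlib
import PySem

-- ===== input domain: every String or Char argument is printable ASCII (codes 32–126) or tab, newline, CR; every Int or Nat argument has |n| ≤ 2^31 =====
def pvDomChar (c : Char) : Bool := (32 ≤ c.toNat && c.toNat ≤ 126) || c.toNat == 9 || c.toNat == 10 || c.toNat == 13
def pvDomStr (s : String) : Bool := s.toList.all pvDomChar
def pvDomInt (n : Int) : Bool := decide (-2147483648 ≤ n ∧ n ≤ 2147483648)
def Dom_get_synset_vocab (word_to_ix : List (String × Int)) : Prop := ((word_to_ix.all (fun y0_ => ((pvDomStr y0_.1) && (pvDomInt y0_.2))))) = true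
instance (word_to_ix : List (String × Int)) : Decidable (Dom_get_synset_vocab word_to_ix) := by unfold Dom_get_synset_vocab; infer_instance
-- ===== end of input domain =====

-- B re-groups by a two-pass comprehension pipeline (extract pairs, dedup keys, per-key gather)
-- instead of A's incremental dict mutation; same cost class, different decomposition.

-- ===== PORT A =====
-- A's loop body: find "_bn:", skip if absent, else append index to (or create) the synset bucket.
-- The parameter is a Python dict (distinct keys), so word_to_ix[word] is the pair's own value.
def getSynStep (d : PySem.Dict String (List Int)) (p : String × Int) : PySem.Dict String (List Int) :=
  let bn_id_pos := PySem.Str.find p.1 "_bn:"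
  if bn_id_pos < 0 then d
  else
    let bn_id := PySem.Str.slice p.1 (some (bn_id_pos + 1)) none
    if d.contains bn_id = false then d.insert bn_id [p.2]
    else d.modify bn_id [] (fun xs => xs ++ [p.2])

def get_synset_vocab (word_to_ix : List (String × Int)) : List (String × List Int) :=
  (word_to_ix.foldl getSynStep PySem.Dict.empty).items

-- ===== PORT B =====
-- the comprehension: [(w[w.find("_bn:")+1:], ix) for w, ix in word_to_ix.items() if w.find("_bn:") >= 0]
def bnPairs (word_to_ix : List (String × Int)) : List (String × Int) :=
  word_to_ix.filterMap (fun p =>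
    let pos := PySem.Str.find p.1 "_bn:"
    if 0 ≤ pos then some (PySem.Str.slice p.1 (some (pos + 1)) none, p.2) else none)

def get_synset_vocab_alt (word_to_ix : List (String × Int)) : List (String × List Int) :=
  let pairs := bnPairs word_to_ix
  (PySem.List.dedup (pairs.map Prod.fst)).map
    (fun k => (k, (pairs.filter (fun q => q.1 == k)).map Prod.snd))

-- ===== PRECONDITION & SPEC =====
def Spec_get_synset_vocab (word_to_ix : List (String × Int)) (out : List (String × List Int)) : Prop := out = get_synset_vocab_alt word_to_ix
instance (word_to_ix : List (String × Int)) (out : List (String × List Int)) : Decidable (Spec_get_synset_vocab word_to_ix out) := by unfold Spec_get_synset_vocab; infer_instance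

-- ===== CLAIM (what is proved, stated in full; the proofs are below) =====
def Claim_equal_get_synset_vocab : Prop := ∀ (word_to_ix : List (String × Int)), Dom_get_synset_vocab word_to_ix → Spec_get_synset_vocab word_to_ix (get_synset_vocab word_to_ix)

-- ===== LEMMAS AND PROOFS =====

def pairStep (d : PySem.Dict String (List Int)) (q : String × Int) : PySem.Dict String (List Int) :=
  if d.contains q.1 = false then d.insert q.1 [q.2]
  else d.modify q.1 [] (fun xs => xs ++ [q.2])

-- A's fold over the raw list is the fold of pairStep over the extracted pair list
theorem fold_eq_fold_bnPairs (l : List (String × Int)) (d : PySem.Dict String (List Int)) :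
    l.foldl getSynStep d = (bnPairs l).foldl pairStep d := by
  induction l generalizing d with
  | nil => rfl
  | cons p t ih =>
    simp only [List.foldl_cons, getSynStep, bnPairs, List.filterMap_cons]
    by_cases h : PySem.Str.find p.1 "_bn:" < 0
    · rw [if_pos h, if_neg (by omega : ¬ (0:Int) ≤ PySem.Str.find p.1 "_bn:")]
      exact ih d
    · rw [if_neg h, if_pos (by omega : (0:Int) ≤ PySem.Str.find p.1 "_bn:")]
      rw [List.foldl_cons, ih]
      rfl

theorem dedup_cons (k : String) (xs : List String) :
    PySem.List.dedup (k :: xs) = k :: (PySem.List.dedup xs).filter (fun y => !(y == k)) := by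
  have h1 : PySem.List.dedup (k :: xs) = PySem.Set.update [k] xs := by
    simp [PySem.List.dedup, PySem.Set.ofList, PySem.Set.update, PySem.Set.add,
      PySem.Set.contains, PySem.Set.empty]
  rw [h1, PySem.Set.update_eq_append_filter]
  simp only [PySem.List.dedup, List.singleton_append, List.cons.injEq, true_and]
  exact List.filter_congr (fun y _ => by simp [PySem.Set.contains, beq_eq_decide])

theorem not_contains_insert (d : PySem.Dict String (List Int)) (k y : String) (v0 : List Int) :
    (!(d.insert k v0).contains y) = (!d.contains y && !(y == k)) := by
  rw [PySem.Dict.contains_insert]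
  cases hy : y == k <;> simp

theorem newkeys_eq (d : PySem.Dict String (List Int)) (k : String) (v : Int) (v0 : List Int)
    (t : List (String × Int)) :
    ((PySem.List.dedup (t.map Prod.fst)).filter (fun y => !(d.insert k v0).contains y)).map
      (fun y => (y, (t.filter (fun q => q.1 == y)).map Prod.snd))
    = (((PySem.List.dedup (t.map Prod.fst)).filter (fun y => !(y == k))).filter
        (fun y => !d.contains y)).map
      (fun y => (y, (((k, v) :: t).filter (fun q => q.1 == y)).map Prod.snd)) := by
  rw [List.filter_filter]
  have hpred : ∀ y ∈ PySem.List.dedup (t.map Prod.fst),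
      (!(d.insert k v0).contains y) = ((!d.contains y) && !(y == k)) :=
    fun y _ => not_contains_insert d k y v0
  rw [List.filter_congr hpred]
  apply List.map_congr_left
  intro y hy
  have h2 := List.of_mem_filter hy
  have h3 : (y == k) = false := by
    simp only [Bool.and_eq_true, Bool.not_eq_true'] at h2
    exact h2.2
  have hyk : (k == y) = false := by
    simp only [beq_eq_false_iff_ne] at h3 ⊢
    exact h3.symm
  simp [hyk]

theorem fold_pairStep_items (ps : List (String × Int)) :
    ∀ (d : PySem.Dict String (List Int)), d.keys.Nodup →
    (ps.foldl pairStep d).items =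
      d.items.map (fun e => (e.1, e.2 ++ (ps.filter (fun q => q.1 == e.1)).map Prod.snd))
      ++ ((PySem.List.dedup (ps.map Prod.fst)).filter (fun k => !d.contains k)).map
           (fun k => (k, (ps.filter (fun q => q.1 == k)).map Prod.snd)) := by
  induction ps with
  | nil =>
    intro d hnd
    simp [PySem.List.dedup, PySem.Set.ofList, PySem.Set.empty]
  | cons q t ih =>
    intro d hnd
    obtain ⟨k, v⟩ := q
    have hmem : ∀ e ∈ d.items, d.contains e.1 = true := fun e he =>
      (PySem.Dict.contains_iff_mem_keys d e.1).mpr (PySem.Dict.mem_keys_of_mem_items d he)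
    rw [List.foldl_cons,
      show ((k, v) :: t).map Prod.fst = k :: t.map Prod.fst from rfl, dedup_cons]
    by_cases h : d.contains k = true
    · have hstep : pairStep d (k, v) = d.insert k (d.getD k [] ++ [v]) := by
        simp [pairStep, h, PySem.Dict.modify]
      rw [hstep, ih _ (PySem.Dict.nodup_keys_insert d k _ hnd)]
      rw [PySem.Dict.items_insert_of_contains d _ h, List.map_map]
      rw [List.filter_cons, show (!d.contains k) = false from by simp [h]]
      rw [if_neg Bool.false_ne_true]
      congr 1
      · apply List.map_congr_left
        intro e he
        by_cases hek : e.1 = k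
        · have hv : d.getD k [] = e.2 := by
            have hin : (k, e.2) ∈ d.items := by rw [← hek]; exact he
            exact PySem.Dict.getD_of_mem_items d hin hnd []
          simp [Function.comp, hek, hv, List.append_assoc]
        · have hke : (k == e.1) = false := by
            simp only [beq_eq_false_iff_ne]
            exact fun he2 => hek he2.symm
          simp [Function.comp, hek, hke]
      · exact newkeys_eq d k v _ t
    · have h' : d.contains k = false := by simpa using h
      have hstep : pairStep d (k, v) = d.insert k [v] := by
        simp [pairStep, h']
      rw [hstep, ih _ (PySem.Dict.nodup_keys_insert d k _ hnd)]
      rw [PySem.Dict.items_insert_of_not_contains d _ h', List.map_append, List.append_assoc]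
      rw [List.filter_cons, show (!d.contains k) = true from by simp [h'], if_pos rfl, List.map_cons]
      simp only [List.map_cons, List.map_nil, List.cons_append, List.nil_append]
      congr 1
      · apply List.map_congr_left
        intro e he
        have hke : (k == e.1) = false := by
          simp only [beq_eq_false_iff_ne]
          intro he2
          rw [he2, hmem e he] at h'
          exact Bool.noConfusion h'
        simp [hke]
      · refine List.cons_eq_cons.mpr ⟨?_, newkeys_eq d k v [v] t⟩
        simp

-- ===== VERDICT (by name: the statement is the Claim_ definition above) =====
theorem get_synset_vocab_spec : Claim_equal_get_synset_vocab := by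
  intro l _
  unfold Spec_get_synset_vocab get_synset_vocab get_synset_vocab_alt
  rw [fold_eq_fold_bnPairs, fold_pairStep_items (bnPairs l) PySem.Dict.empty (by simp [PySem.Dict.empty, PySem.Dict.keys])]
  simp [PySem.Dict.empty]
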